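-- pv_equiv track=rewrite | github.com/mgbarsky/VIRTUAL_LAB | FINAL_VERSION/utils.py | get_new_id
-- ===== SOURCE A (Python) =====
-- def get_new_id(id_list): #returns next avilable id
--     if len(id_list)==0:
--         return 0
--
--     id_list.sort()
--
--     for i in range(len(id_list) - 1):
--         if id_list[i+1] > id_list[i] + 1:
--             return id_list[i] + 1
--
--     return (id_list[len(id_list)-1]+1)
-- ===== SOURCE B (Python) =====
-- def get_new_id(id_list):  # returns next available id
--     s = set(id_list)
--     if not s:
--         return 0
--     return min(e + 1 for e in s if e + 1 not in s)
-- ===== Notes on version B (the rewrite author's own statement) =====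
-- stated objective: alternative
-- what changed: Replaces sort-then-adjacent-gap-scan with a hash set and a single comprehension taking min{e+1 : e in S, e+1 not in S}; O(n) expected instead of O(n log n), though not measurably faster at tested sizes.
import Mathlib
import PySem

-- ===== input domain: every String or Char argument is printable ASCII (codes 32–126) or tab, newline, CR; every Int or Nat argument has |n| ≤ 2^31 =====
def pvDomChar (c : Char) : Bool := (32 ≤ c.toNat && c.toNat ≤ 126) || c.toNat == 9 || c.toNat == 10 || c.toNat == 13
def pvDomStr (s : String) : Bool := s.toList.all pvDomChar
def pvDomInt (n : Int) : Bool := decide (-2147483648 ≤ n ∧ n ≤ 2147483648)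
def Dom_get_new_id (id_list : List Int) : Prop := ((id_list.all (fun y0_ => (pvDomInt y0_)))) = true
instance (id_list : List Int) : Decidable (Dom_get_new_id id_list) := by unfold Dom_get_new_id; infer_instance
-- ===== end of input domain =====

-- B replaces A's sort + adjacent-gap scan by a hash set and min{e+1 : e ∈ S, e+1 ∉ S};
-- the equivalence is about the RETURN value only: A sorts id_list in place, B does not mutate it.

-- ===== PORT A =====
-- 'for i in range(len(id_list)-1): if id_list[i+1] > id_list[i]+1: return id_list[i]+1' — the
-- early-return scan over adjacent elements of the sorted list
def pvALoop : List Int → Option Int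
  | x :: y :: rest => if y > x + 1 then some (x + 1) else pvALoop (y :: rest)
  | _ => none

def get_new_id (id_list : List Int) : Int :=
  if id_list.length = 0 then 0
  else
    let s := PySem.List.sorted id_list (fun x => x) false
    match pvALoop s with
    | some v => v
    | none => PySem.List.pyGetD s ((s.length : Int) - 1) 0 + 1

-- ===== PORT B =====
def get_new_id_alt (id_list : List Int) : Int :=
  let s : PySem.Set Int := PySem.Set.ofList id_list
  if s = [] then 0
  else
    match PySem.List.min? ((s.filter (fun e => !(PySem.Set.contains s (e + 1)))).map (fun e => e + 1)) (fun x => x) with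
    | some m => m
    | none => 0    -- unreachable: when s ≠ [] the candidate list contains max(s)+1

-- ===== PRECONDITION & SPEC =====
def Spec_get_new_id (id_list : List Int) (out : Int) : Prop := out = get_new_id_alt id_list
instance (id_list : List Int) (out : Int) : Decidable (Spec_get_new_id id_list out) := by unfold Spec_get_new_id; infer_instance

-- ===== CLAIM (what is proved, stated in full; the proofs are below) =====
def Claim_equal_get_new_id : Prop := ∀ (id_list : List Int), Dom_get_new_id id_list → Spec_get_new_id id_list (get_new_id id_list)

-- ===== LEMMAS AND PROOFS =====

-- "m is the first free id" with respect to the members of s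
def pvGood (s : List Int) (m : Int) : Prop :=
  (m - 1) ∈ s ∧ m ∉ s ∧ ∀ e ∈ s, (e + 1) ∉ s → m ≤ e + 1

theorem pvGood_unique {s : List Int} {m₁ m₂ : Int}
    (h₁ : pvGood s m₁) (h₂ : pvGood s m₂) : m₁ = m₂ := by
  have a := h₁.2.2 (m₂ - 1) h₂.1 (by simpa using h₂.2.1)
  have b := h₂.2.2 (m₁ - 1) h₁.1 (by simpa using h₁.2.1)
  omega

theorem pvGood_congr {s t : List Int} (h : ∀ x, x ∈ s ↔ x ∈ t) (m : Int) :
    pvGood s m ↔ pvGood t m := by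
  unfold pvGood
  constructor <;> rintro ⟨h1, h2, h3⟩
  · exact ⟨(h _).1 h1, fun hm => h2 ((h _).2 hm),
      fun e he hne => h3 e ((h _).2 he) (fun hx => hne ((h _).1 hx))⟩
  · exact ⟨(h _).2 h1, fun hm => h2 ((h _).1 hm),
      fun e he hne => h3 e ((h _).1 he) (fun hx => hne ((h _).2 hx))⟩

-- A's scan result on a sorted nonempty list is the first free id
theorem pvA_good : ∀ (s : List Int), s.Pairwise (· ≤ ·) → s ≠ [] →
    pvGood s ((pvALoop s).getD (s.getLastD 0 + 1))
  | [], _, hne => absurd rfl hne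
  | [x], _, _ => by
      refine ⟨by simp [pvALoop], ?_, ?_⟩
      · simp [pvALoop]
      · intro e he _; simp [pvALoop] at he ⊢; omega
  | x :: y :: rest, hp, _ => by
      have hxy : x ≤ y := (List.pairwise_cons.1 hp).1 y (by simp)
      have hxr : ∀ r ∈ rest, x ≤ r := fun r hr => (List.pairwise_cons.1 hp).1 r (by simp [hr])
      have hyr : ∀ r ∈ rest, y ≤ r := fun r hr =>
        (List.pairwise_cons.1 (List.pairwise_cons.1 hp).2).1 r hr
      by_cases hgap : y > x + 1
      · have hl : pvALoop (x :: y :: rest) = some (x + 1) := by simp [pvALoop, hgap]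
        rw [hl]
        refine ⟨by simp, ?_, ?_⟩
        · simp only [Option.getD_some, List.mem_cons]
          push_neg
          refine ⟨by omega, by omega, fun hmem => ?_⟩
          have := hyr _ hmem; omega
        · intro e he _
          simp only [Option.getD_some]
          simp only [List.mem_cons] at he
          rcases he with rfl | rfl | he
          · omega
          · omega
          · have := hxr _ he; omega
      · have hrec : pvALoop (x :: y :: rest) = pvALoop (y :: rest) := by
          simp [pvALoop, hgap]
        have hlast : (x :: y :: rest).getLastD 0 = (y :: rest).getLastD 0 := by simp
        rw [hrec, hlast]
        have ih := pvA_good (y :: rest) (List.pairwise_cons.1 hp).2 (by simp)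
        obtain ⟨i1, i2, i3⟩ := ih
        refine ⟨List.mem_cons_of_mem _ i1, ?_, ?_⟩
        · simp only [List.mem_cons] at i2 ⊢
          push_neg at i2 ⊢
          refine ⟨?_, i2.1, i2.2⟩
          intro hmx
          -- if the result were x, then x - 1 would be a member of y :: rest, all of whose
          -- elements are ≥ y ≥ x
          rw [hmx] at i1
          simp only [List.mem_cons] at i1
          rcases i1 with h' | h'
          · omega
          · have := hyr _ h'; omega
        · intro e he hne
          have hne' : e + 1 ≠ x ∧ e + 1 ≠ y ∧ e + 1 ∉ rest := by
            simp only [List.mem_cons] at hne; push_neg at hne; exact hne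
          rcases List.mem_cons.1 he with rfl | he'
          · -- e = x; since y ≤ x + 1 and x ≤ y, y is x or x + 1; y = x + 1 contradicts e+1 ∉ list
            have hyx : y = e := by
              by_contra hneq
              have hy1 : y = e + 1 := by omega
              exact hne'.2.1 hy1.symm
            have h2 : y + 1 ∉ y :: rest := by
              intro hmem
              rcases List.mem_cons.1 hmem with h' | h'
              · omega
              · exact hne'.2.2 (by rwa [hyx] at h')
            have := i3 y List.mem_cons_self h2
            omega
          · refine i3 e he' ?_
            intro hmem
            rcases List.mem_cons.1 hmem with h' | h'
            · exact hne'.2.1 h'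
            · exact hne'.2.2 h'

-- B's result on a nonempty input is the first free id w.r.t. set(id_list)
theorem pvB_good (id_list : List Int) (hne : id_list ≠ []) :
    pvGood (PySem.Set.ofList id_list) (get_new_id_alt id_list) := by
  obtain ⟨h, t, rfl⟩ := List.exists_cons_of_ne_nil hne
  set S := PySem.Set.ofList (h :: t) with hS
  have hSne : S ≠ [] := by
    intro h0
    have : h ∈ S := (PySem.Set.mem_ofList (h :: t) h).2 (by simp)
    simp [h0] at this
  unfold get_new_id_alt
  rw [← hS, if_neg hSne]
  set L := (S.filter (fun e => !(PySem.Set.contains S (e + 1)))).map (fun e => e + 1) with hL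
  have hLmem : ∀ {z : Int}, z ∈ L ↔ (z - 1) ∈ S ∧ z ∉ S := by
    intro z
    rw [hL]
    simp only [List.mem_map, List.mem_filter, Bool.not_eq_eq_eq_not, Bool.not_true]
    constructor
    · rintro ⟨e, ⟨he, hc⟩, rfl⟩
      simp only [PySem.Set.contains_eq_listContains] at hc
      refine ⟨by simpa using he, fun hz => ?_⟩
      have hcc : List.contains S (e + 1) = true := List.contains_iff_mem.2 hz
      rw [hcc] at hc
      cases hc
    · rintro ⟨h1, h2⟩
      refine ⟨z - 1, ⟨h1, by simpa using h2⟩, by omega⟩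
  cases hmin : PySem.List.min? L (fun x => x) with
  | none =>
      exfalso
      have hLnil : L = [] := (PySem.List.min?_eq_none_iff _ _).1 hmin
      cases hmax : PySem.List.max? S (fun x => x) with
      | none => exact hSne ((PySem.List.max?_eq_none_iff _ _).1 hmax)
      | some M =>
          have hMmem := PySem.List.max?_mem hmax
          have hMmax := PySem.List.max?_isMax hmax
          have : (M + 1) ∈ L := hLmem.2 ⟨by simpa using hMmem, fun hc => by
            have := hMmax _ hc; omega⟩
          simp [hLnil] at this
  | some m =>
      have hm := hLmem.1 (PySem.List.min?_mem hmin)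
      have hmin' := PySem.List.min?_isMin hmin
      refine ⟨hm.1, hm.2, ?_⟩
      intro e he hene
      exact hmin' (e + 1) (hLmem.2 ⟨by simpa using he, hene⟩)

-- id_list[len(id_list)-1] on a nonempty list is its last element
theorem pvGetLast (s : List Int) (hne : s ≠ []) :
    PySem.List.pyGetD s ((s.length : Int) - 1) 0 = s.getLastD 0 := by
  have hlt : s.length - 1 < s.length := Nat.sub_lt (List.length_pos_of_ne_nil hne) one_pos
  have h1 : ((s.length : Int) - 1) = ((s.length - 1 : Nat) : Int) := by
    have := List.length_pos_of_ne_nil hne; omega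
  rw [h1, PySem.List.pyGetD_natCast]
  rw [List.getLastD_eq_getLast?, List.getLast?_eq_getElem?]
  simp [hlt]

-- ===== VERDICT (by name: the statement is the Claim_ definition above) =====
theorem get_new_id_spec : Claim_equal_get_new_id := by
  unfold Claim_equal_get_new_id
  intro id_list _
  unfold Spec_get_new_id
  by_cases hnil : id_list = []
  · subst hnil; rfl
  · have hlen : ¬ id_list.length = 0 := by simpa using hnil
    set s := PySem.List.sorted id_list (fun x => x) false with hs
    have hsne : s ≠ [] := by
      intro h0
      have := PySem.List.length_sorted (xs := id_list) (key := fun x => x) (rev := false)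
      rw [← hs, h0] at this
      simp at this
      exact hnil (List.eq_nil_of_length_eq_zero this.symm)
    have hA : get_new_id id_list = (pvALoop s).getD (s.getLastD 0 + 1) := by
      unfold get_new_id
      rw [if_neg hlen]
      show (match pvALoop s with
            | some v => v
            | none => PySem.List.pyGetD s ((s.length : Int) - 1) 0 + 1)
          = (pvALoop s).getD (s.getLastD 0 + 1)
      rw [pvGetLast s hsne]
      cases pvALoop s <;> simp
    have hAgood : pvGood s ((pvALoop s).getD (s.getLastD 0 + 1)) :=
      pvA_good s (PySem.List.sorted_pairwise (xs := id_list) (key := fun x => x)) hsne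
    have hmemA : ∀ x, x ∈ s ↔ x ∈ PySem.Set.ofList id_list := by
      intro x
      rw [hs, PySem.List.mem_sorted, PySem.Set.mem_ofList]
    have hAgood' : pvGood (PySem.Set.ofList id_list) (get_new_id id_list) := by
      rw [hA]
      exact (pvGood_congr hmemA _).1 hAgood
    exact pvGood_unique hAgood' (pvB_good id_list hnil)
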